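-- pv_equiv track=rewrite | github.com/decov12/projetoep2dessoft | funcoes.py | calcula_pontos_quadra
-- ===== SOURCE A (Python) =====
-- def calcula_pontos_quadra(dados_rolados):
--     i=0
--     soma=0
--     quadra=0
--     while i < len (dados_rolados):
--         j=0
--         contador=0
--         while j<len(dados_rolados):
--             if dados_rolados[i]==dados_rolados[j]:
--                 contador+=1
--             j+=1
--         if contador>3:
--             quadra=1
--         soma+=dados_rolados[i]
--         i+=1
--     if quadra==1:
--         return soma
--     else:
--         return 0
-- ===== SOURCE B (Python) =====
-- def calcula_pontos_quadra(dados_rolados):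
--     total = sum(dados_rolados)
--     ordenados = sorted(dados_rolados)
--     has_quad = False
--     run = 0
--     prev = None
--     for v in ordenados:
--         run = run + 1 if (prev is not None and v == prev) else 1
--         if run > 3:
--             has_quad = True
--         prev = v
--     return total if has_quad else 0
-- ===== Notes on version B (the rewrite author's own statement) =====
-- stated objective: faster
-- what changed: Replaced the per-element full rescan (nested while loops counting occurrences of each element) by one sum, one sorted copy and a single run-length pass over the sorted data that flags any run longer than 3.
import Mathlib
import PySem

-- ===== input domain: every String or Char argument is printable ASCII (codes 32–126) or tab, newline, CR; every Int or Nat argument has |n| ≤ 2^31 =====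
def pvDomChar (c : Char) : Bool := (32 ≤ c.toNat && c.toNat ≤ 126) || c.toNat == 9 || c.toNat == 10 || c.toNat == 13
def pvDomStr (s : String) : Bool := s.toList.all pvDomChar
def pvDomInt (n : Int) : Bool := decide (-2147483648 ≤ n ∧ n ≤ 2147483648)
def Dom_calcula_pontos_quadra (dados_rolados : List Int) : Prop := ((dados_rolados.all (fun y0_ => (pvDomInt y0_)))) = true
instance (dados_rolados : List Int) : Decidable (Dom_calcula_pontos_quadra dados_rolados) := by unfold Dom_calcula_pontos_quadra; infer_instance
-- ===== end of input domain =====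

-- B replaces A's quadratic per-element rescan by sum + sorted copy + one run-length pass (faster; the input list is not mutated by either side).

-- ===== PORT A =====
def calcula_pontos_quadra (dados_rolados : List Int) : Int :=
  let n : Int := dados_rolados.length
  let st := (PySem.List.pyRange 0 n 1).foldl (fun (st : Int × Int) i =>
    let di := PySem.List.pyGetD dados_rolados i 0
    let contador := (PySem.List.pyRange 0 n 1).foldl (fun c j =>
      if di = PySem.List.pyGetD dados_rolados j 0 then c + 1 else c) (0 : Int)
    let quadra := if contador > 3 then (1 : Int) else st.2
    (st.1 + di, quadra)) ((0 : Int), (0 : Int))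
  if st.2 = 1 then st.1 else 0

-- ===== PORT B =====
-- one step of B's run-length loop: st = (prev, run, has_quad)
def altStep (st : Option Int × Int × Bool) (v : Int) : Option Int × Int × Bool :=
  let run : Int := if st.1 = some v then st.2.1 + 1 else 1
  (some v, run, st.2.2 || decide (3 < run))

def calcula_pontos_quadra_alt (dados_rolados : List Int) : Int :=
  let total := dados_rolados.foldl (· + ·) 0
  let ordenados := PySem.List.sorted dados_rolados (fun x => x) false
  let st := ordenados.foldl altStep (none, 0, false)
  if st.2.2 then total else 0

-- ===== PRECONDITION & SPEC =====
def Spec_calcula_pontos_quadra (dados_rolados : List Int) (out : Int) : Prop := out = calcula_pontos_quadra_alt dados_rolados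
instance (dados_rolados : List Int) (out : Int) : Decidable (Spec_calcula_pontos_quadra dados_rolados out) := by unfold Spec_calcula_pontos_quadra; infer_instance

-- ===== CLAIM (what is proved, stated in full; the proofs are below) =====
def Claim_equal_calcula_pontos_quadra : Prop := ∀ (dados_rolados : List Int), Dom_calcula_pontos_quadra dados_rolados → Spec_calcula_pontos_quadra dados_rolados (calcula_pontos_quadra dados_rolados)

-- ===== LEMMAS AND PROOFS =====

-- A's inner loop counts occurrences
theorem foldl_count (v : Int) (l : List Int) (c : Int) :
    l.foldl (fun c x => if v = x then c + 1 else c) c = c + (l.count v : Int) := by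
  induction l generalizing c with
  | nil => simp
  | cons b t ih =>
    by_cases h : v = b
    · subst h; simp [List.foldl_cons, ih, List.count_cons]; ring
    · simp [List.foldl_cons, ih, h, Ne.symm h]

-- A's outer loop: sum and flag
theorem foldl_A (c : Int → Int) (m : List Int) (s q : Int) :
    m.foldl (fun (st : Int × Int) x => (st.1 + x, if c x > 3 then (1 : Int) else st.2)) (s, q)
      = (s + m.sum, if m.any (fun x => decide (3 < c x)) then 1 else q) := by
  induction m generalizing s q with
  | nil => simp
  | cons b t ih =>
    simp only [List.foldl_cons, ih, List.any_cons, List.sum_cons]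
    by_cases h : 3 < c b <;> simp [h] <;> ring

theorem A_eq_ref (l : List Int) :
    calcula_pontos_quadra l
      = (if l.any (fun x => decide (3 < (l.count x : Int))) then l.sum else 0) := by
  unfold calcula_pontos_quadra
  simp only
  rw [PySem.List.foldl_pyRange_zero_pyGetD' l 0
      (fun (st : Int × Int) di =>
        (st.1 + di, if ((PySem.List.pyRange 0 (l.length : Int) 1).foldl (fun c j =>
          if di = PySem.List.pyGetD l j 0 then c + 1 else c) (0 : Int)) > 3 then (1 : Int) else st.2))
      ((0 : Int), (0 : Int))]
  have hstep : (fun (st : Int × Int) di =>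
        (st.1 + di, if ((PySem.List.pyRange 0 (l.length : Int) 1).foldl (fun c j =>
          if di = PySem.List.pyGetD l j 0 then c + 1 else c) (0 : Int)) > 3 then (1 : Int) else st.2))
      = (fun (st : Int × Int) x => (st.1 + x, if (l.count x : Int) > 3 then (1 : Int) else st.2)) := by
    funext st x
    rw [show ((PySem.List.pyRange 0 (l.length : Int) 1).foldl (fun c j =>
          if x = PySem.List.pyGetD l j 0 then c + 1 else c) (0 : Int)) = (l.count x : Int) by
      rw [PySem.List.foldl_pyRange_zero_pyGetD' l 0
          (fun (c : Int) y => if x = y then c + 1 else c) (0 : Int), foldl_count]; ring]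
  rw [hstep, foldl_A (fun x => (l.count x : Int)) l 0 0]
  by_cases h : l.any (fun x => decide (3 < (l.count x : Int))) = true <;>
    simp [h]

-- B's run-length pass, generalized invariant:
-- state (some a, r, f) with everything in xs ≥ a, xs sorted, and f already set when r > 3
theorem foldl_B (xs : List Int) (hs : xs.Pairwise (· ≤ ·)) :
    ∀ (a r : Int) (f : Bool), (3 < r → f = true) → (∀ x ∈ xs, a ≤ x) →
    (xs.foldl altStep (some a, r, f)).2.2
      = (f || decide (3 < r + (xs.count a : Int))
          || xs.any (fun x => decide (3 < xs.count x) && decide (a < x))) := by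
  induction xs with
  | nil =>
    intro a r f hf _
    simp only [List.foldl_nil, List.count_nil, List.any_nil, Bool.or_false]
    cases f with
    | true => simp
    | false =>
      simp only [Bool.false_or]
      have : ¬ 3 < r := fun h => by simpa using hf h
      simp [this]
  | cons b t ih =>
    intro a r f hf ha
    have hab : a ≤ b := ha b (List.mem_cons_self ..)
    have hbt : ∀ x ∈ t, b ≤ x := fun x hx => (List.pairwise_cons.mp hs).1 x hx
    have hst : t.Pairwise (· ≤ ·) := (List.pairwise_cons.mp hs).2
    by_cases h : a = b
    · subst h
      simp only [List.foldl_cons, altStep]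
      simp only [if_true]
      rw [ih hst a (r + 1) _ (by intro h3; simp [h3]) hbt]
      have hcnt : ∀ x ∈ t, x ≠ a → (a :: t).count x = t.count x := by
        intro x _ hx; simp [List.count_cons, hx, Ne.symm hx]
      rw [Bool.eq_iff_iff]
      simp only [Bool.or_eq_true, Bool.and_eq_true, decide_eq_true_eq, List.any_eq_true,
        List.mem_cons, List.count_cons_self]
      constructor
      · rintro (((hf2 | h3) | h3) | ⟨x, hx, hc, hax⟩)
        · exact Or.inl (Or.inl hf2)
        · exact Or.inl (Or.inr (by push_cast at h3 ⊢; omega))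
        · exact Or.inl (Or.inr (by push_cast at h3 ⊢; omega))
        · exact Or.inr ⟨x, Or.inr hx, by rwa [hcnt x hx (by omega)], hax⟩
      · rintro ((hf2 | h3) | ⟨x, hx2, hc, hax⟩)
        · exact Or.inl (Or.inl (Or.inl hf2))
        · exact Or.inl (Or.inr (by push_cast at h3 ⊢; omega))
        · rcases hx2 with rfl | hx2
          · exact absurd hax (lt_irrefl x)
          · exact Or.inr ⟨x, hx2, by rwa [hcnt x hx2 (by omega)] at hc, hax⟩
    · have hlt : a < b := lt_of_le_of_ne hab h
      have hna : a ∉ b :: t := by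
        intro hmem
        rcases List.mem_cons.mp hmem with h' | hmem
        · exact h h'
        · exact absurd (hbt a hmem) (not_le.mpr hlt)
      simp only [List.foldl_cons, altStep]
      rw [if_neg (by simpa using fun e => h e)]
      have h31 : ¬ (3 < (1 : Int)) := by omega
      rw [show (f || decide (3 < (1:Int))) = f by simp [h31]]
      rw [ih hst b 1 f (by intro h3; omega) hbt]
      have hca : (b :: t).count a = 0 := List.count_eq_zero.mpr hna
      rw [hca]
      have hcnt : ∀ x ∈ t, x ≠ b → (b :: t).count x = t.count x := by
        intro x _ hx; simp [List.count_cons, hx, Ne.symm hx]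
      rw [Bool.eq_iff_iff]
      simp only [Bool.or_eq_true, Bool.and_eq_true, decide_eq_true_eq, List.any_eq_true,
        List.mem_cons]
      constructor
      · rintro ((hf2 | h3) | ⟨x, hx, hc, hbx⟩)
        · exact Or.inl (Or.inl hf2)
        · exact Or.inr ⟨b, Or.inl rfl,
            by rw [List.count_cons_self]; push_cast at h3 ⊢; omega, hlt⟩
        · exact Or.inr ⟨x, Or.inr hx, by rwa [hcnt x hx (by omega)], lt_trans hlt hbx⟩
      · rintro ((hf2 | h3) | ⟨x, hx2, hc, hax⟩)
        · exact Or.inl (Or.inl hf2)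
        · exact Or.inl (Or.inl (hf (by push_cast at h3; omega)))
        · rcases hx2 with rfl | hx2
          · exact Or.inl (Or.inr
              (by rw [List.count_cons_self] at hc; push_cast at hc ⊢; omega))
          · by_cases hxb : x = b
            · subst hxb
              exact Or.inl (Or.inr
                (by rw [List.count_cons_self] at hc; push_cast at hc ⊢; omega))
            · exact Or.inr ⟨x, hx2, by rwa [hcnt x hx2 hxb] at hc,
                lt_of_le_of_ne (hbt x hx2) (Ne.symm hxb)⟩

theorem flag_B (s : List Int) (hs : s.Pairwise (· ≤ ·)) :
    (s.foldl altStep (none, 0, false)).2.2 = s.any (fun x => decide (3 < s.count x)) := by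
  cases s with
  | nil => simp
  | cons b t =>
    have hst : t.Pairwise (· ≤ ·) := (List.pairwise_cons.mp hs).2
    have hbt : ∀ x ∈ t, b ≤ x := fun x hx => (List.pairwise_cons.mp hs).1 x hx
    simp only [List.foldl_cons, altStep]
    rw [if_neg (by simp)]
    have h31 : ¬ (3 < (1 : Int)) := by omega
    rw [show (false || decide (3 < (1:Int))) = false by simp [h31]]
    rw [foldl_B t hst b 1 false (by intro h3; omega) hbt]
    have hcnt : ∀ x ∈ t, x ≠ b → (b :: t).count x = t.count x := by
      intro x _ hx; simp [List.count_cons, hx, Ne.symm hx]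
    rw [Bool.eq_iff_iff]
    simp only [Bool.or_eq_true, Bool.and_eq_true, decide_eq_true_eq, List.any_eq_true,
      List.mem_cons, Bool.false_or]
    constructor
    · rintro (h3 | ⟨x, hx, hc, hbx⟩)
      · exact ⟨b, Or.inl rfl, by rw [List.count_cons_self]; push_cast at h3 ⊢; omega⟩
      · exact ⟨x, Or.inr hx, by rwa [hcnt x hx (by omega)]⟩
    · rintro ⟨x, hx2, hc⟩
      rcases hx2 with rfl | hx2
      · exact Or.inl (by rw [List.count_cons_self] at hc; push_cast at hc ⊢; omega)
      · by_cases hxb : x = b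
        · subst hxb
          exact Or.inl (by rw [List.count_cons_self] at hc; push_cast at hc ⊢; omega)
        · exact Or.inr ⟨x, hx2, by rwa [hcnt x hx2 hxb] at hc,
            lt_of_le_of_ne (hbt x hx2) (Ne.symm hxb)⟩

theorem B_eq_ref (l : List Int) :
    calcula_pontos_quadra_alt l
      = (if l.any (fun x => decide (3 < (l.count x : Int))) then l.sum else 0) := by
  unfold calcula_pontos_quadra_alt
  simp only
  have hperm : (PySem.List.sorted l (fun x => x) false).Perm l := PySem.List.sorted_perm ..
  have hpw : (PySem.List.sorted l (fun x => x) false).Pairwise (· ≤ ·) := by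
    simpa using PySem.List.sorted_pairwise l (fun x => x)
  rw [flag_B _ hpw]
  have hsum : l.foldl (· + ·) 0 = l.sum := by
    rw [List.sum_eq_foldl]
  have hany : (PySem.List.sorted l (fun x => x) false).any
        (fun x => decide (3 < (PySem.List.sorted l (fun x => x) false).count x))
      = l.any (fun x => decide (3 < (l.count x : Int))) := by
    rw [Bool.eq_iff_iff]
    simp only [List.any_eq_true, decide_eq_true_eq]
    constructor
    · rintro ⟨x, hx, hc⟩
      exact ⟨x, hperm.mem_iff.mp hx, by rw [hperm.count_eq] at hc; push_cast; omega⟩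
    · rintro ⟨x, hx, hc⟩
      exact ⟨x, hperm.mem_iff.mpr hx, by rw [hperm.count_eq]; push_cast at hc; omega⟩
  rw [hany, hsum]

-- ===== VERDICT (by name: the statement is the Claim_ definition above) =====
theorem calcula_pontos_quadra_spec : Claim_equal_calcula_pontos_quadra := by
  intro l _
  unfold Spec_calcula_pontos_quadra
  rw [A_eq_ref, B_eq_ref]
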